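-- pv_equiv track=rewrite | github.com/msmassolo/Resumen_de_noticias | email_sender.py | formatear_html
-- ===== SOURCE A (Python) =====
-- def formatear_html(contenido):
--
--     bloques = contenido.split("CATEGORIA:")
--
--     html_final = ""
--     categoria_actual = None
--
--     for bloque in bloques:
--         if not bloque.strip():
--             continue
--
--         lineas = bloque.strip().split("\n")
--
--         categoria = lineas[0].strip().upper()
--
--         # 🔥 Mostrar categoría SOLO si cambia
--         if categoria != categoria_actual:
--             html_final += f"""
--             <div style="margin-top:30px;">
--                 <h3 style="
--                     text-align:center;
--                     font-size:16px;
--                     font-weight:bold;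
--                     color:#333;
--                     border-bottom:2px solid #eee;
--                     padding-bottom:8px;
--                 ">
--                     {categoria}
--                 </h3>
--             </div>
--             """
--             categoria_actual = categoria
--
--         titulo = ""
--         resumen = ""
--         links = []
--
--         for l in lineas[1:]:
--             l = l.strip()
--
--             if l.startswith("TITULO:"):
--                 titulo = l.replace("TITULO:", "").strip()
--
--             elif l.startswith("RESUMEN:"):
--                 resumen = l.replace("RESUMEN:", "").strip()
--
--             elif l.startswith("- http"):
--                 links.append(l.replace("- ", "").strip())
--
--             # 🔴 fin de noticia
--             if "-----------------------------" in l: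
--
--                 html_final += f"""
--                 <div style="
--                     margin:15px 0;
--                     padding:12px;
--                     background:#fafafa;
--                     border-radius:6px;
--                 ">
--                     <p style="margin:5px 0;"><b>{titulo}</b></p>
--                     <p style="margin:5px 0;"><b>{resumen}</b></p>
--                 """
--
--                 if links:
--                     html_final += "<p style='margin:5px 0;'><b>Links:</b><br>"
--                     for link in links:
--                         html_final += f"""
--                         <a href="{link}" style="color:#1a73e8; text-decoration:none;"><b>{link}</b></a><br>
--                         """
--                     html_final += "</p>"
--
--                 html_final += "</div>"
--
--                 # reset
--                 titulo = ""
--                 resumen = ""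
--                 links = []
--
--     return html_final
-- ===== SOURCE B (Python) =====
-- _SEP = "-----------------------------"
--
-- _TPL_CAT = """
--             <div style="margin-top:30px;">
--                 <h3 style="
--                     text-align:center;
--                     font-size:16px;
--                     font-weight:bold;
--                     color:#333;
--                     border-bottom:2px solid #eee;
--                     padding-bottom:8px;
--                 ">
--                     {}
--                 </h3>
--             </div>
--             """
--
-- _TPL_ITEM = """
--                 <div style="
--                     margin:15px 0;
--                     padding:12px;
--                     background:#fafafa;
--                     border-radius:6px;
--                 ">
--                     <p style="margin:5px 0;"><b>{}</b></p>
--                     <p style="margin:5px 0;"><b>{}</b></p>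
--                 """
--
-- _TPL_LINK = """
--                         <a href="{0}" style="color:#1a73e8; text-decoration:none;"><b>{0}</b></a><br>
--                         """
--
--
-- def _segmentos(ls):
--     # split the stripped lines into news-segments, each ending with (and
--     # including) a separator line; a trailing non-terminated tail is dropped
--     for i, l in enumerate(ls):
--         if _SEP in l:
--             return [ls[:i + 1]] + _segmentos(ls[i + 1:])
--     return []
--
--
-- def _ultimo_campo(seg, pref):
--     for l in reversed(seg):
--         if l.startswith(pref):
--             return l.replace(pref, "").strip()
--     return ""
--
--
-- def _render_item(seg):
--     titulo = _ultimo_campo(seg, "TITULO:")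
--     resumen = _ultimo_campo(seg, "RESUMEN:")
--     links = [l.replace("- ", "").strip() for l in seg if l.startswith("- http")]
--     html = _TPL_ITEM.format(titulo, resumen)
--     if links:
--         html += "<p style='margin:5px 0;'><b>Links:</b><br>"
--         html += "".join(_TPL_LINK.format(link) for link in links)
--         html += "</p>"
--     return html + "</div>"
--
--
-- def formatear_html(contenido):
--     partes = []
--     categoria_actual = None
--     for bloque in contenido.split("CATEGORIA:"):
--         b = bloque.strip()
--         if not b:
--             continue
--         lineas = b.split("\n")
--         categoria = lineas[0].strip().upper()
--         if categoria != categoria_actual: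
--             partes.append(_TPL_CAT.format(categoria))
--             categoria_actual = categoria
--         partes.extend(_render_item(seg)
--                       for seg in _segmentos([l.strip() for l in lineas[1:]]))
--     return "".join(partes)
-- ===== Notes on version B (the rewrite author's own statement) =====
-- stated objective: alternative
-- what changed: The inner flush-on-sentinel state machine over lines is replaced by a two-phase decomposition: cut the stripped lines into separator-terminated segments (dropping a non-terminated tail), then parse each segment independently (last TITULO:, last RESUMEN:, all '- http' links, scanned declaratively) and render it with the same templates; the output is assembled as a list of parts joined once instead of repeated string concatenation.
import Mathlib
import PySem

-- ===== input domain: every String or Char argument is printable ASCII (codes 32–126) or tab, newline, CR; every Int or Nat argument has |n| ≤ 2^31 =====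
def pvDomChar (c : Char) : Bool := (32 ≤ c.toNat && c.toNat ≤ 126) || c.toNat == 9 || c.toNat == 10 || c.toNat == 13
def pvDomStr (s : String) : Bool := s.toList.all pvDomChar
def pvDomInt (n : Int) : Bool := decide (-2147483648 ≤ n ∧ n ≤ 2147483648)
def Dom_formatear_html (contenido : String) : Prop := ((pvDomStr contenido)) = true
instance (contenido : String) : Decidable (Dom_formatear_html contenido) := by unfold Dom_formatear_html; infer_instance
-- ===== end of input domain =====

-- B replaces the inner flush-on-sentinel state machine by "cut the lines into separator-terminated
-- segments, then parse and render each segment independently" (objective: alternative decomposition,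
-- same cost); the return values are proved equal on all inputs.

-- ===== PORT A =====
-- the literal HTML templates shared by both Python versions (A inlines them as f-strings)
def pvSep : List Char := ("-----------------------------" : String).toList
def pvCatL : List Char := ("\n            <div style=\"margin-top:30px;\">\n                <h3 style=\"\n                    text-align:center;\n                    font-size:16px;\n                    font-weight:bold;\n                    color:#333;\n                    border-bottom:2px solid #eee;\n                    padding-bottom:8px;\n                \">\n                    " : String).toList
def pvCatR : List Char := ("\n                </h3>\n            </div>\n            " : String).toList
def pvItem1 : List Char := ("\n                <div style=\"\n                    margin:15px 0;\n                    padding:12px;\n                    background:#fafafa;\n                    border-radius:6px;\n                \">\n                    <p style=\"margin:5px 0;\"><b>" : String).toList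
def pvItem2 : List Char := ("</b></p>\n                    <p style=\"margin:5px 0;\"><b>" : String).toList
def pvItem3 : List Char := ("</b></p>\n                " : String).toList
def pvLink1 : List Char := ("\n                        <a href=\"" : String).toList
def pvLink2 : List Char := ("\" style=\"color:#1a73e8; text-decoration:none;\"><b>" : String).toList
def pvLink3 : List Char := ("</b></a><br>\n                        " : String).toList
def pvLinksHdr : List Char := ("<p style='margin:5px 0;'><b>Links:</b><br>" : String).toList
def pvPCierre : List Char := ("</p>" : String).toList
def pvDivCierre : List Char := ("</div>" : String).toList
def pvTit : List Char := ("TITULO:" : String).toList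
def pvRes : List Char := ("RESUMEN:" : String).toList
def pvHttp : List Char := ("- http" : String).toList
def pvGuion : List Char := ("- " : String).toList
def plantillaCategoria (cat : List Char) : List Char := pvCatL ++ cat ++ pvCatR
def plantillaItem (t r : List Char) : List Char := pvItem1 ++ t ++ pvItem2 ++ r ++ pvItem3
def plantillaLink (link : List Char) : List Char := pvLink1 ++ link ++ pvLink2 ++ link ++ pvLink3

-- A's if/elif chain updating (titulo, resumen, links)
def pvAsigna (t r : List Char) (ls : List (List Char)) (l : List Char) :
    List Char × List Char × List (List Char) :=
  if PySem.Chars.startswith l pvTit then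
    (PySem.Chars.strip (PySem.Chars.replace l pvTit []), r, ls)
  else if PySem.Chars.startswith l pvRes then
    (t, PySem.Chars.strip (PySem.Chars.replace l pvRes []), ls)
  else if PySem.Chars.startswith l pvHttp then
    (t, r, ls ++ [PySem.Chars.strip (PySem.Chars.replace l pvGuion [])])
  else (t, r, ls)

-- A's html += … emission at an end-of-news line
def pvFlushA (html t r : List Char) (ls : List (List Char)) : List Char :=
  let html := html ++ plantillaItem t r
  let html := if ls = [] then html
    else (ls.foldl (fun h link => h ++ plantillaLink link) (html ++ pvLinksHdr)) ++ pvPCierre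
  html ++ pvDivCierre

-- one iteration of A's loop over "lineas[1:]"
def pvStepLineaA (st : (List Char × List Char × List (List Char)) × List Char) (l0 : List Char) :
    (List Char × List Char × List (List Char)) × List Char :=
  let l := PySem.Chars.strip l0
  let (t, r, ls) := pvAsigna st.1.1 st.1.2.1 st.1.2.2 l
  if PySem.Chars.isIn pvSep l then (([], [], []), pvFlushA st.2 t r ls)
  else ((t, r, ls), st.2)

-- one iteration of A's loop over "bloques"; state = (html_final, categoria_actual)
def pvBloqueA (st : List Char × Option (List Char)) (bloque : List Char) :
    List Char × Option (List Char) :=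
  if PySem.Chars.strip bloque = [] then st
  else
    let lineas := PySem.Chars.splitOn (PySem.Chars.strip bloque) ("\n" : String).toList
    let categoria := PySem.Chars.upper (PySem.Chars.strip (PySem.List.pyGetD lineas 0 []))
    let (html, catAct) :=
      if st.2 ≠ some categoria then (st.1 ++ plantillaCategoria categoria, some categoria)
      else st
    (((PySem.List.slice lineas (some 1) none).foldl pvStepLineaA (([], [], []), html)).2, catAct)

def formatear_html (contenido : String) : String :=
  String.ofList ((PySem.Chars.splitOn contenido.toList ("CATEGORIA:" : String).toList).foldl
      pvBloqueA ([], none)).1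

-- ===== PORT B =====
-- _segmentos: cut the stripped lines at the first separator line, recurse on the rest
def pvSegmentos (ls : List (List Char)) : List (List (List Char)) :=
  match h : ls.findIdx? (fun l => PySem.Chars.isIn pvSep l) with
  | none => []
  | some i => ls.take (i + 1) :: pvSegmentos (ls.drop (i + 1))
  termination_by ls.length
  decreasing_by
    have hi := (List.findIdx?_eq_some_iff_getElem.mp h).1
    simp only [List.length_drop]; omega

-- _ultimo_campo: last line of the segment starting with pref, processed
def pvUltimoCampo (seg : List (List Char)) (pref : List Char) : List Char :=
  match seg.reverse.find? (fun l => PySem.Chars.startswith l pref) with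
  | some l => PySem.Chars.strip (PySem.Chars.replace l pref [])
  | none => []

-- _render_item
def pvRenderItem (seg : List (List Char)) : List Char :=
  let titulo := pvUltimoCampo seg pvTit
  let resumen := pvUltimoCampo seg pvRes
  let links := (seg.filter (fun l => PySem.Chars.startswith l pvHttp)).map
      (fun l => PySem.Chars.strip (PySem.Chars.replace l pvGuion []))
  let html := plantillaItem titulo resumen
  let html := if links = [] then html
    else html ++ pvLinksHdr ++ PySem.Chars.join [] (links.map plantillaLink) ++ pvPCierre
  html ++ pvDivCierre

-- one iteration of B's loop over "bloques"; state = (partes, categoria_actual)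
def pvBloqueB (st : List (List Char) × Option (List Char)) (bloque : List Char) :
    List (List Char) × Option (List Char) :=
  let b := PySem.Chars.strip bloque
  if b = [] then st
  else
    let lineas := PySem.Chars.splitOn b ("\n" : String).toList
    let categoria := PySem.Chars.upper (PySem.Chars.strip (PySem.List.pyGetD lineas 0 []))
    let (partes, catAct) :=
      if st.2 ≠ some categoria then (st.1 ++ [plantillaCategoria categoria], some categoria)
      else st
    (partes ++ (pvSegmentos ((PySem.List.slice lineas (some 1) none).map
        PySem.Chars.strip)).map pvRenderItem, catAct)

def formatear_html_alt (contenido : String) : String :=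
  String.ofList (PySem.Chars.join []
    ((PySem.Chars.splitOn contenido.toList ("CATEGORIA:" : String).toList).foldl
      pvBloqueB ([], none)).1)

-- ===== PRECONDITION & SPEC =====
def Spec_formatear_html (contenido : String) (out : String) : Prop := out = formatear_html_alt contenido
instance (contenido : String) (out : String) : Decidable (Spec_formatear_html contenido out) := by unfold Spec_formatear_html; infer_instance

-- ===== CLAIM (what is proved, stated in full; the proofs are below) =====
def Claim_equal_formatear_html : Prop := ∀ (contenido : String), Dom_formatear_html contenido → Spec_formatear_html contenido (formatear_html contenido)

-- ===== LEMMAS AND PROOFS =====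

-- A's loop step with the strip already applied to the line
def pvStep' (st : (List Char × List Char × List (List Char)) × List Char) (l : List Char) :
    (List Char × List Char × List (List Char)) × List Char :=
  let (t, r, ls) := pvAsigna st.1.1 st.1.2.1 st.1.2.2 l
  if PySem.Chars.isIn pvSep l then (([], [], []), pvFlushA st.2 t r ls)
  else ((t, r, ls), st.2)

lemma pvStepLineaA_eq : pvStepLineaA = fun st l0 => pvStep' st (PySem.Chars.strip l0) := rfl

lemma pvStep'_eq (st : (List Char × List Char × List (List Char)) × List Char) (l : List Char) :
    pvStep' st l =
      if PySem.Chars.isIn pvSep l then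
        (([], [], []), pvFlushA st.2 (pvAsigna st.1.1 st.1.2.1 st.1.2.2 l).1
          (pvAsigna st.1.1 st.1.2.1 st.1.2.2 l).2.1 (pvAsigna st.1.1 st.1.2.1 st.1.2.2 l).2.2)
      else ((pvAsigna st.1.1 st.1.2.1 st.1.2.2 l), st.2) := rfl

-- pvUltimoCampo with an explicit default (the field value carried into the segment)
def pvCampoD (seg : List (List Char)) (pref d : List Char) : List Char :=
  match seg.reverse.find? (fun l => PySem.Chars.startswith l pref) with
  | some l => PySem.Chars.strip (PySem.Chars.replace l pref [])
  | none => d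

lemma pvUltimoCampo_eq (seg : List (List Char)) (pref : List Char) :
    pvUltimoCampo seg pref = pvCampoD seg pref [] := rfl

def pvLinksOf (seg : List (List Char)) : List (List Char) :=
  (seg.filter (fun l => PySem.Chars.startswith l pvHttp)).map
    (fun l => PySem.Chars.strip (PySem.Chars.replace l pvGuion []))

-- the html one flush emits, as a standalone value
def pvRenderCore (t r : List Char) (links : List (List Char)) : List Char :=
  plantillaItem t r ++
    (if links = [] then [] else pvLinksHdr ++ (links.map plantillaLink).flatten ++ pvPCierre) ++
    pvDivCierre

lemma pvJoinNil (parts : List (List Char)) : PySem.Chars.join [] parts = parts.flatten := by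
  simp only [PySem.Chars.join]
  induction parts with
  | nil => rfl
  | cons p parts ih =>
    cases parts with
    | nil => simp [List.intercalate]
    | cons q parts =>
      simp only [List.intercalate, List.intersperse] at ih ⊢
      simp_all

lemma pvRenderItem_eq (seg : List (List Char)) :
    pvRenderItem seg = pvRenderCore (pvCampoD seg pvTit []) (pvCampoD seg pvRes []) (pvLinksOf seg) := by
  rw [← pvUltimoCampo_eq, ← pvUltimoCampo_eq]
  unfold pvRenderItem pvRenderCore pvLinksOf
  split_ifs with h <;> simp [pvJoinNil, h]

lemma pvFlushA_eq (html t r : List Char) (ls : List (List Char)) :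
    pvFlushA html t r ls = html ++ pvRenderCore t r ls := by
  unfold pvFlushA pvRenderCore
  split_ifs with h <;> simp

lemma pvExcl2 (l p q : List Char) (hlen : p.length ≤ q.length) (hnp : ¬ p <+: q)
    (hp : PySem.Chars.startswith l p = true) (hq : PySem.Chars.startswith l q = true) : False :=
  hnp (List.prefix_of_prefix_length_le ((PySem.Chars.startswith_iff l p).mp hp)
    ((PySem.Chars.startswith_iff l q).mp hq) hlen)

lemma pvAsigna_eq (t r : List Char) (ls : List (List Char)) (l : List Char) :
    pvAsigna t r ls l =
      ((if PySem.Chars.startswith l pvTit then PySem.Chars.strip (PySem.Chars.replace l pvTit []) else t),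
       (if PySem.Chars.startswith l pvRes then PySem.Chars.strip (PySem.Chars.replace l pvRes []) else r),
       ls ++ (if PySem.Chars.startswith l pvHttp then [PySem.Chars.strip (PySem.Chars.replace l pvGuion [])] else [])) := by
  unfold pvAsigna
  by_cases hT : PySem.Chars.startswith l pvTit
  · have hR : ¬ PySem.Chars.startswith l pvRes := fun h =>
      pvExcl2 l pvTit pvRes (by decide) (by decide) hT h
    have hH : ¬ PySem.Chars.startswith l pvHttp := fun h =>
      pvExcl2 l pvHttp pvTit (by decide) (by decide) h hT
    simp [hT, hR, hH]
  · by_cases hR : PySem.Chars.startswith l pvRes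
    · have hH : ¬ PySem.Chars.startswith l pvHttp := fun h =>
        pvExcl2 l pvHttp pvRes (by decide) (by decide) h hR
      simp [hT, hR, hH]
    · by_cases hH : PySem.Chars.startswith l pvHttp <;> simp [hT, hR, hH]

lemma pvCampoD_cons (l : List Char) (seg : List (List Char)) (pref d : List Char) :
    pvCampoD (l :: seg) pref d =
      pvCampoD seg pref
        (if PySem.Chars.startswith l pref then PySem.Chars.strip (PySem.Chars.replace l pref []) else d) := by
  unfold pvCampoD
  rw [List.reverse_cons, List.find?_append]
  cases h : seg.reverse.find? (fun l => PySem.Chars.startswith l pref) with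
  | some x => simp
  | none =>
    simp only [Option.none_or]
    by_cases hl : PySem.Chars.startswith l pref <;> simp [hl]

lemma pvCampoD_append (seg : List (List Char)) (l : List Char) (pref d : List Char) :
    pvCampoD (seg ++ [l]) pref d =
      if PySem.Chars.startswith l pref then PySem.Chars.strip (PySem.Chars.replace l pref [])
      else pvCampoD seg pref d := by
  unfold pvCampoD
  rw [List.reverse_append]
  by_cases hl : PySem.Chars.startswith l pref
  · simp [hl]
  · cases h : seg.reverse.find? (fun l => PySem.Chars.startswith l pref) <;>
      simp [hl, h]

lemma pvLinksOf_append (seg : List (List Char)) (l : List Char) :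
    pvLinksOf (seg ++ [l]) =
      pvLinksOf seg ++
        (if PySem.Chars.startswith l pvHttp then [PySem.Chars.strip (PySem.Chars.replace l pvGuion [])] else []) := by
  unfold pvLinksOf
  by_cases h : PySem.Chars.startswith l pvHttp <;> simp [List.filter_append, List.filter, h]

lemma pvLinksOf_cons (l : List Char) (seg : List (List Char)) :
    pvLinksOf (l :: seg) =
      (if PySem.Chars.startswith l pvHttp then [PySem.Chars.strip (PySem.Chars.replace l pvGuion [])] else []) ++
        pvLinksOf seg := by
  unfold pvLinksOf
  by_cases h : PySem.Chars.startswith l pvHttp <;> simp [h]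

-- the pure field fold (A's loop with no flush ever firing)
lemma pvFoldAsigna (seg : List (List Char)) : ∀ t r ls,
    seg.foldl (fun s l => pvAsigna s.1 s.2.1 s.2.2 l) (t, r, ls) =
      (pvCampoD seg pvTit t, pvCampoD seg pvRes r, ls ++ pvLinksOf seg) := by
  induction seg with
  | nil => intro t r ls; simp [pvCampoD, pvLinksOf]
  | cons l seg ih =>
    intro t r ls
    rw [List.foldl_cons]
    show (seg.foldl (fun s l => pvAsigna s.1 s.2.1 s.2.2 l)
      ((pvAsigna t r ls l).1, (pvAsigna t r ls l).2.1, (pvAsigna t r ls l).2.2)) = _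
    rw [pvAsigna_eq, pvCampoD_cons, pvCampoD_cons, pvLinksOf_cons]
    rw [ih]
    by_cases h : PySem.Chars.startswith l pvHttp <;> simp [h]

-- a stretch of lines with no separator only updates the fields
lemma pvFoldNoSep (seg : List (List Char)) (hs : ∀ l ∈ seg, PySem.Chars.isIn pvSep l = false) :
    ∀ st html, seg.foldl pvStep' (st, html) =
      (seg.foldl (fun s l => pvAsigna s.1 s.2.1 s.2.2 l) st, html) := by
  induction seg with
  | nil => intro st html; rfl
  | cons l seg ih =>
    intro st html
    have hl := hs l (List.mem_cons_self ..)
    rw [List.foldl_cons, List.foldl_cons, pvStep'_eq]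
    rw [if_neg (by simp [hl])]
    exact ih (fun x hx => hs x (List.mem_cons_of_mem _ hx)) _ _

-- B's rendering of the segment list, with the fields carried into the first segment
def pvRenderSegs (t r : List Char) (fls : List (List Char)) (ls : List (List Char)) : List Char :=
  match h : ls.findIdx? (fun l => PySem.Chars.isIn pvSep l) with
  | none => []
  | some i =>
      pvRenderCore (pvCampoD (ls.take (i + 1)) pvTit t) (pvCampoD (ls.take (i + 1)) pvRes r)
          (fls ++ pvLinksOf (ls.take (i + 1))) ++
        pvRenderSegs [] [] [] (ls.drop (i + 1))
  termination_by ls.length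
  decreasing_by
    have hi := (List.findIdx?_eq_some_iff_getElem.mp h).1
    simp only [List.length_drop]; omega

lemma pvRenderSegs_none (t r : List Char) (fls ls : List (List Char))
    (h : ls.findIdx? (fun l => PySem.Chars.isIn pvSep l) = none) :
    pvRenderSegs t r fls ls = [] := by
  rw [pvRenderSegs.eq_def]; split <;> simp_all

lemma pvRenderSegs_some (t r : List Char) (fls ls : List (List Char)) (i : Nat)
    (h : ls.findIdx? (fun l => PySem.Chars.isIn pvSep l) = some i) :
    pvRenderSegs t r fls ls =
      pvRenderCore (pvCampoD (ls.take (i + 1)) pvTit t) (pvCampoD (ls.take (i + 1)) pvRes r)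
          (fls ++ pvLinksOf (ls.take (i + 1))) ++
        pvRenderSegs [] [] [] (ls.drop (i + 1)) := by
  rw [pvRenderSegs.eq_def]; split
  · simp_all
  · rename_i i' heq
    rw [h] at heq
    cases heq
    rfl

lemma pvSegmentos_none (ls : List (List Char))
    (h : ls.findIdx? (fun l => PySem.Chars.isIn pvSep l) = none) :
    pvSegmentos ls = [] := by
  rw [pvSegmentos.eq_def]; split <;> simp_all

lemma pvSegmentos_some (ls : List (List Char)) (i : Nat)
    (h : ls.findIdx? (fun l => PySem.Chars.isIn pvSep l) = some i) :
    pvSegmentos ls = ls.take (i + 1) :: pvSegmentos (ls.drop (i + 1)) := by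
  rw [pvSegmentos.eq_def]; split
  · simp_all
  · rename_i i' heq
    rw [h] at heq
    cases heq
    rfl

-- the key inner-loop equivalence: A's flush loop emits exactly B's per-segment renderings
lemma pvInner (ls : List (List Char)) : ∀ t r fls html,
    (ls.foldl pvStep' ((t, r, fls), html)).2 = html ++ pvRenderSegs t r fls ls := by
  induction ls using pvSegmentos.induct with
  | case1 ls h =>
    intro t r fls html
    rw [pvRenderSegs_none _ _ _ _ h]
    rw [pvFoldNoSep ls (by
      intro x hx
      have := List.findIdx?_eq_none_iff.mp h x hx
      simpa using this) _ _]
    simp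
  | case2 ls i h ih =>
    intro t r fls html
    obtain ⟨hi, hpi, hlt⟩ := List.findIdx?_eq_some_iff_getElem.mp h
    have htake : ls.take (i + 1) = ls.take i ++ [ls[i]] := by
      rw [List.take_add_one]
      simp [List.getElem?_eq_getElem hi]
    have hdec : ls = ls.take i ++ [ls[i]] ++ ls.drop (i + 1) := by
      rw [← htake]; exact (List.take_append_drop (i + 1) ls).symm
    conv_lhs => rw [hdec]
    rw [List.foldl_append, List.foldl_append]
    rw [pvFoldNoSep (ls.take i) (by
      intro x hx
      obtain ⟨j, hj, hje⟩ := List.mem_take_iff_getElem.mp hx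
      have := hlt j (by omega)
      simp only [← hje]
      simpa using this) _ _]
    rw [pvFoldAsigna]
    rw [show ∀ (st : (List Char × List Char × List (List Char)) × List Char),
        [ls[i]].foldl pvStep' st = pvStep' st ls[i] from fun _ => rfl]
    rw [pvStep'_eq]
    rw [if_pos (by simpa using hpi)]
    rw [ih]
    rw [pvFlushA_eq]
    rw [pvRenderSegs_some _ _ _ _ _ h]
    rw [pvAsigna_eq]
    rw [htake, pvCampoD_append, pvCampoD_append, pvLinksOf_append]
    simp [List.append_assoc]

lemma pvRenderSegs_empty (ls : List (List Char)) :
    pvRenderSegs [] [] [] ls = ((pvSegmentos ls).map pvRenderItem).flatten := by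
  induction ls using pvSegmentos.induct with
  | case1 ls h => rw [pvRenderSegs_none _ _ _ _ h, pvSegmentos_none _ h]; rfl
  | case2 ls i h ih =>
    rw [pvRenderSegs_some _ _ _ _ _ h, pvSegmentos_some _ _ h]
    rw [ih]
    simp only [List.nil_append]
    rw [← pvRenderItem_eq]
    simp

-- per-block equivalence, with the html accumulator related to the parts list by flatten
lemma pvBloque_eq (partes : List (List Char)) (cat : Option (List Char)) (b : List Char) :
    pvBloqueA (partes.flatten, cat) b =
      ((pvBloqueB (partes, cat) b).1.flatten, (pvBloqueB (partes, cat) b).2) := by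
  unfold pvBloqueA pvBloqueB
  by_cases hb : PySem.Chars.strip b = []
  · simp [hb]
  · simp only [hb, if_neg, if_false]
    set lineas := PySem.Chars.splitOn (PySem.Chars.strip b) ("\n" : String).toList with hl
    set categoria := PySem.Chars.upper (PySem.Chars.strip (PySem.List.pyGetD lineas 0 [])) with hc
    have hfold : ∀ html : List Char,
        (((PySem.List.slice lineas (some 1) none).foldl pvStepLineaA (([], [], []), html)).2 : List Char)
          = html ++ ((pvSegmentos ((PySem.List.slice lineas (some 1) none).map
              PySem.Chars.strip)).map pvRenderItem).flatten := by
      intro html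
      rw [pvStepLineaA_eq, ← List.foldl_map, pvInner, pvRenderSegs_empty]
    by_cases hcat : cat = some categoria <;>
      simp [hcat, hfold, List.flatten_append]

lemma pvFold_eq (bloques : List (List Char)) : ∀ (partes : List (List Char)) (cat : Option (List Char)),
    bloques.foldl pvBloqueA (partes.flatten, cat) =
      (((bloques.foldl pvBloqueB (partes, cat)).1).flatten, (bloques.foldl pvBloqueB (partes, cat)).2) := by
  induction bloques with
  | nil => intro partes cat; rfl
  | cons b bloques ih =>
    intro partes cat
    rw [List.foldl_cons, List.foldl_cons, pvBloque_eq]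
    rw [ih (pvBloqueB (partes, cat) b).1 (pvBloqueB (partes, cat) b).2]

-- ===== VERDICT (by name: the statement is the Claim_ definition above) =====
theorem formatear_html_spec : Claim_equal_formatear_html := by
  intro contenido _
  unfold Spec_formatear_html formatear_html formatear_html_alt
  rw [pvJoinNil]
  have h := pvFold_eq (PySem.Chars.splitOn contenido.toList ("CATEGORIA:" : String).toList) [] none
  simp only [List.flatten_nil] at h
  rw [h]
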